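-- pv_equiv track=rewrite | github.com/developwithyashmhatre66666/jagruti | Backend/realtime_search/pipeline.py | _pick_provider
-- ===== SOURCE A (Python) =====
-- def _pick_provider(query: str, default: str) -> tuple[str, str]:
--     low = query.lower().strip()
--     mapping = (
--         ("youtube ", "youtube"),
--         ("yt ", "youtube"),
--         ("reddit ", "reddit"),
--         ("wikipedia ", "wikipedia"),
--         ("wiki ", "wikipedia"),
--         ("duckduckgo ", "duckduckgo"),
--         ("ddg ", "duckduckgo"),
--         ("bing ", "bing"),
--         ("brave ", "brave"),
--         ("google ", "google"),
--     )
--     for pref, prov in mapping: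
--         if low.startswith(pref):
--             return prov, query[len(pref) :].strip()
--     return default, query
-- ===== SOURCE B (Python) =====
-- # B: single dict lookup on the first token of the lowered/stripped query
-- # (split off via partition) instead of A's linear scan over ten prefixes.
-- _MAP = {
--     "youtube": "youtube", "yt": "youtube",
--     "reddit": "reddit",
--     "wikipedia": "wikipedia", "wiki": "wikipedia",
--     "duckduckgo": "duckduckgo", "ddg": "duckduckgo",
--     "bing": "bing", "brave": "brave", "google": "google",
-- }
--
-- def _pick_provider(query: str, default: str) -> tuple[str, str]:
--     low = query.lower().strip()
--     first, sep, _rest = low.partition(" ")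
--     prov = _MAP.get(first)
--     if sep == " " and prov is not None:
--         return prov, query[len(first) + 1:].strip()
--     return default, query
-- ===== Notes on version B (the rewrite author's own statement) =====
-- stated objective: idiomatic
-- what changed: Replaces A's linear scan over ten 'keyword ' prefixes (each a startswith test plus per-prefix slice) by splitting off the first token of the lowered/stripped query with partition and doing a single dict lookup keyed by that token.
import Mathlib
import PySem

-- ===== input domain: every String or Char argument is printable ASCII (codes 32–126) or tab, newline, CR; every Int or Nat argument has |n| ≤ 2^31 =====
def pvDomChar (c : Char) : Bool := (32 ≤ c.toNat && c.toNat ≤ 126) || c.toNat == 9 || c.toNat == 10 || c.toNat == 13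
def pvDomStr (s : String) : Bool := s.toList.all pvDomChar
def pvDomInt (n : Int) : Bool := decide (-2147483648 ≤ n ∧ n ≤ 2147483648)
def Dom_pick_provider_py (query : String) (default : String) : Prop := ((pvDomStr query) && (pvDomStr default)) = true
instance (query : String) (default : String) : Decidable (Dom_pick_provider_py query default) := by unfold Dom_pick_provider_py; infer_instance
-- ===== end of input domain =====

-- B replaces A's linear scan over ten "keyword " prefixes by splitting off the first
-- token of the lowered/stripped query and doing one dict lookup (objective: idiomatic).

-- ===== PORT A =====
-- the for-loop over the literal mapping tuple
def pickProviderLoop (query : String) (low : String) (default : String) :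
    List (String × String) → String × String
  | [] => (default, query)
  | (pref, prov) :: rest =>
    if PySem.Str.startswith low pref then
      (prov, PySem.Str.strip (PySem.Str.slice query (some (PySem.Str.len pref)) none))
    else pickProviderLoop query low default rest

def pvMapping : List (String × String) :=
  [("youtube ", "youtube"), ("yt ", "youtube"), ("reddit ", "reddit"),
   ("wikipedia ", "wikipedia"), ("wiki ", "wikipedia"),
   ("duckduckgo ", "duckduckgo"), ("ddg ", "duckduckgo"),
   ("bing ", "bing"), ("brave ", "brave"), ("google ", "google")]

def pick_provider_py (query : String) (default : String) : String × String :=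
  pickProviderLoop query (PySem.Str.strip (PySem.Str.lower query)) default pvMapping

-- ===== PORT B =====
-- hand port of str.partition(sep) for a nonempty sep: exact — first occurrence via find,
-- (s, "", "") when absent, otherwise (s[:i], sep, s[i+len(sep):])
def pyPartition (s : String) (sep : String) : String × String × String :=
  let i := PySem.Str.find s sep
  if i = -1 then (s, "", "")
  else (PySem.Str.slice s none (some i), sep,
        PySem.Str.slice s (some (i + PySem.Str.len sep)) none)

def pvProviderMap : PySem.Dict String String :=
  PySem.Dict.ofList
    [("youtube", "youtube"), ("yt", "youtube"), ("reddit", "reddit"),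
     ("wikipedia", "wikipedia"), ("wiki", "wikipedia"),
     ("duckduckgo", "duckduckgo"), ("ddg", "duckduckgo"),
     ("bing", "bing"), ("brave", "brave"), ("google", "google")]

def pickAlt (query : String) (low : String) (default : String) : String × String :=
  let p := pyPartition low " "
  let prov? := PySem.Dict.get? pvProviderMap p.1
  if p.2.1 = " " then
    match prov? with
    | some prov =>
        (prov, PySem.Str.strip (PySem.Str.slice query (some (PySem.Str.len p.1 + 1)) none))
    | none => (default, query)
  else (default, query)

def pick_provider_py_alt (query : String) (default : String) : String × String :=
  pickAlt query (PySem.Str.strip (PySem.Str.lower query)) default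

-- ===== PRECONDITION & SPEC =====
def Spec_pick_provider_py (query : String) (default : String) (out : String × String) : Prop := out = pick_provider_py_alt query default
instance (query : String) (default : String) (out : String × String) : Decidable (Spec_pick_provider_py query default out) := by unfold Spec_pick_provider_py; infer_instance

-- ===== CLAIM (what is proved, stated in full; the proofs are below) =====
def Claim_equal_pick_provider_py : Prop := ∀ (query : String) (default : String), Dom_pick_provider_py query default → Spec_pick_provider_py query default (pick_provider_py query default)

-- ===== LEMMAS AND PROOFS =====

-- [' '] is a prefix of L.drop j exactly when L has ' ' at index j
theorem space_prefix_drop (L : List Char) (j : Nat) :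
    [' '] <+: L.drop j ↔ L[j]? = some ' ' := by
  constructor
  · rintro ⟨t, ht⟩
    have : (L.drop j).head? = some ' ' := by rw [← ht]; rfl
    simpa [List.head?_drop] using this
  · intro h
    refine ⟨(L.drop j).tail, ?_⟩
    have h' : (L.drop j).head? = some ' ' := by simpa [List.head?_drop] using h
    cases hd : L.drop j with
    | nil => simp [hd] at h'
    | cons a t => simp [hd] at h' ⊢; simp [h']

-- a space-free word followed by ' ' is a prefix of t ++ ' ' :: r (t space-free) iff it IS t
theorem prefix_token (k t r : List Char) (hk : ' ' ∉ k) (ht : ' ' ∉ t) :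
    (k ++ [' ']) <+: (t ++ ' ' :: r) ↔ k = t := by
  induction k generalizing t with
  | nil =>
    cases t with
    | nil => simp
    | cons c t' =>
      simp only [List.nil_append]
      constructor
      · rintro ⟨u, hu⟩
        simp at hu
        exact absurd hu.1.symm (fun h => ht (by simp [h]))
      · intro h; exact absurd h (by simp)
  | cons c k' ih =>
    cases t with
    | nil =>
      constructor
      · rintro ⟨u, hu⟩
        simp at hu
        exact absurd hu.1 (fun h => hk (by simp [h]))
      · intro h; exact absurd h (by simp)
    | cons d t' =>
      have hk' : ' ' ∉ k' := fun h => hk (List.mem_cons_of_mem _ h)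
      have ht' : ' ' ∉ t' := fun h => ht (List.mem_cons_of_mem _ h)
      constructor
      · rintro ⟨u, hu⟩
        simp only [List.cons_append] at hu
        injection hu with h1 h2
        subst h1
        have : (k' ++ [' ']) <+: (t' ++ ' ' :: r) := ⟨u, h2⟩
        have := (ih t' hk' ht').mp this
        simp [this]
      · intro h
        injection h with h1 h2
        subst h1; subst h2
        exact ⟨r, by simp⟩

-- the first space of t ++ ' ' :: r (t space-free) is at index t.length
theorem find_space (t r : List Char) (ht : ' ' ∉ t) :
    PySem.Chars.find (t ++ ' ' :: r) [' '] = (t.length : Int) := by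
  set L := t ++ ' ' :: r with hL
  have hat : L[t.length]? = some ' ' := by
    simp [hL]
  have hpre : [' '] <+: L.drop t.length := (space_prefix_drop L t.length).mpr hat
  have hnn : 0 ≤ PySem.Chars.find L [' '] := by
    rcases lt_or_ge (PySem.Chars.find L [' ']) 0 with hlt | hge
    · exfalso
      have h1 : -1 ≤ PySem.Chars.find L [' '] := PySem.Chars.neg_one_le_find L [' ']
      have : PySem.Chars.find L [' '] = -1 := by omega
      have := (PySem.Chars.find_eq_neg_one_iff L [' ']).mp this
      exact this (hpre.isInfix.trans (L.drop_suffix t.length).isInfix)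
    · exact hge
  obtain ⟨hfound, hmin⟩ := PySem.Chars.find_spec hnn
  have hle : (PySem.Chars.find L [' ']).toNat ≤ t.length := by
    by_contra h
    exact (hmin t.length (by omega)) hpre
  have hge : t.length ≤ (PySem.Chars.find L [' ']).toNat := by
    by_contra h
    have hlt : (PySem.Chars.find L [' ']).toNat < t.length := by omega
    have hsp := (space_prefix_drop L _).mp hfound
    have heq : L[(PySem.Chars.find L [' ']).toNat]? = t[(PySem.Chars.find L [' ']).toNat]? := by
      exact List.getElem?_append_left hlt
    exact ht (List.mem_of_getElem? (heq.symm.trans hsp))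
  omega

theorem drop_head (p : Char → Bool) (hp : ∀ x, p x = false → x = ' ') (l tl : List Char) (a : Char)
    (hdw : l.dropWhile p = a :: tl) : a = ' ' := by
  induction l generalizing tl with
  | nil => simp at hdw
  | cons c cs ih =>
    rw [List.dropWhile_cons] at hdw
    by_cases hc : p c = true
    · rw [if_pos hc] at hdw
      exact ih _ hdw
    · rw [if_neg hc] at hdw
      injection hdw with h1 _
      exact h1 ▸ hp c (by simpa using hc)

theorem core_nospace (query default low : String) (hsp : ' ' ∉ low.toList) :
    pickProviderLoop query low default pvMapping = pickAlt query low default := by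
  have hstartF : ∀ (p : List Char), ' ' ∈ p → PySem.Chars.startswith low.toList p = false := by
    intro p hp
    cases hbool : PySem.Chars.startswith low.toList p with
    | false => rfl
    | true => exact absurd (((PySem.Chars.startswith_iff _ _).mp hbool).subset hp) hsp
  have hfind : PySem.Chars.find low.toList [' '] = -1 := by
    rw [PySem.Chars.find_eq_neg_one_iff]
    intro hin
    exact hsp (hin.subset (by simp))
  simp [pickProviderLoop, pvMapping, pickAlt, pyPartition, hfind, hstartF]

theorem core_space (query default low : String) (hsp : ' ' ∈ low.toList) :
    pickProviderLoop query low default pvMapping = pickAlt query low default := by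
  obtain ⟨t, r, hd, ht⟩ : ∃ t r, low.toList = t ++ ' ' :: r ∧ ' ' ∉ t := by
    have ht : ' ' ∉ low.toList.takeWhile (· ≠ ' ') := by
      intro h
      have := List.mem_takeWhile_imp h
      simp at this
    cases hdw : low.toList.dropWhile (· ≠ ' ') with
    | nil =>
      exfalso
      rw [List.dropWhile_eq_nil_iff] at hdw
      have := hdw ' ' hsp
      simp at this
    | cons a tl =>
      have ha : a = ' ' := drop_head _ (by intro x h; simpa using h) _ _ _ hdw
      refine ⟨low.toList.takeWhile (· ≠ ' '), tl, ?_, ht⟩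
      conv_lhs => rw [← List.takeWhile_append_dropWhile (p := (· ≠ ' ')) (l := low.toList)]
      rw [hdw, ha]
  have hfind : PySem.Chars.find low.toList [' '] = (t.length : Int) := by
    rw [hd]; exact find_space t r ht
  have hp1t : (PySem.Str.slice low none (some ((t.length : Int)))).toList = t := by
    rw [PySem.Str.toList_slice, PySem.Chars.slice_eq_listSlice, PySem.List.slice_to_natCast, hd,
      List.take_left]
  have HS : ∀ (k : List Char), ' ' ∉ k →
      PySem.Chars.startswith low.toList (k ++ [' ']) = decide (k = t) := by
    intro k hk
    by_cases h : k = t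
    · subst h
      simp [hd, PySem.Chars.startswith_iff, (prefix_token k k r hk hk).mpr rfl]
    · simp only [hd, decide_eq_false h]
      rw [Bool.eq_false_iff, Ne, PySem.Chars.startswith_iff]
      exact fun hc => h ((prefix_token k t r hk ht).mp hc)
  have hS0 : PySem.Chars.startswith low.toList (['y', 'o', 'u', 't', 'u', 'b', 'e', ' ']) = decide ((['y', 'o', 'u', 't', 'u', 'b', 'e'] : List Char) = t) := by
    have := HS ['y', 'o', 'u', 't', 'u', 'b', 'e'] (by decide)
    simpa using this
  have hS1 : PySem.Chars.startswith low.toList (['y', 't', ' ']) = decide ((['y', 't'] : List Char) = t) := by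
    have := HS ['y', 't'] (by decide)
    simpa using this
  have hS2 : PySem.Chars.startswith low.toList (['r', 'e', 'd', 'd', 'i', 't', ' ']) = decide ((['r', 'e', 'd', 'd', 'i', 't'] : List Char) = t) := by
    have := HS ['r', 'e', 'd', 'd', 'i', 't'] (by decide)
    simpa using this
  have hS3 : PySem.Chars.startswith low.toList (['w', 'i', 'k', 'i', 'p', 'e', 'd', 'i', 'a', ' ']) = decide ((['w', 'i', 'k', 'i', 'p', 'e', 'd', 'i', 'a'] : List Char) = t) := by
    have := HS ['w', 'i', 'k', 'i', 'p', 'e', 'd', 'i', 'a'] (by decide)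
    simpa using this
  have hS4 : PySem.Chars.startswith low.toList (['w', 'i', 'k', 'i', ' ']) = decide ((['w', 'i', 'k', 'i'] : List Char) = t) := by
    have := HS ['w', 'i', 'k', 'i'] (by decide)
    simpa using this
  have hS5 : PySem.Chars.startswith low.toList (['d', 'u', 'c', 'k', 'd', 'u', 'c', 'k', 'g', 'o', ' ']) = decide ((['d', 'u', 'c', 'k', 'd', 'u', 'c', 'k', 'g', 'o'] : List Char) = t) := by
    have := HS ['d', 'u', 'c', 'k', 'd', 'u', 'c', 'k', 'g', 'o'] (by decide)
    simpa using this
  have hS6 : PySem.Chars.startswith low.toList (['d', 'd', 'g', ' ']) = decide ((['d', 'd', 'g'] : List Char) = t) := by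
    have := HS ['d', 'd', 'g'] (by decide)
    simpa using this
  have hS7 : PySem.Chars.startswith low.toList (['b', 'i', 'n', 'g', ' ']) = decide ((['b', 'i', 'n', 'g'] : List Char) = t) := by
    have := HS ['b', 'i', 'n', 'g'] (by decide)
    simpa using this
  have hS8 : PySem.Chars.startswith low.toList (['b', 'r', 'a', 'v', 'e', ' ']) = decide ((['b', 'r', 'a', 'v', 'e'] : List Char) = t) := by
    have := HS ['b', 'r', 'a', 'v', 'e'] (by decide)
    simpa using this
  have hS9 : PySem.Chars.startswith low.toList (['g', 'o', 'o', 'g', 'l', 'e', ' ']) = decide ((['g', 'o', 'o', 'g', 'l', 'e'] : List Char) = t) := by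
    have := HS ['g', 'o', 'o', 'g', 'l', 'e'] (by decide)
    simpa using this
  by_cases e0 : t = (['y', 'o', 'u', 't', 'u', 'b', 'e'] : List Char)
  · have hfirst : PySem.Str.slice low none (some ((t.length : Int))) = "youtube" := by
      apply String.toList_inj.mp
      rw [hp1t, e0]
      rfl
    simp only [e0, List.length_cons, List.length_nil] at hfirst
    norm_num at hfirst
    have hget : pvProviderMap.get? "youtube" = some "youtube" := by decide
    simp [pickProviderLoop, pvMapping, pickAlt, pyPartition, hfind, e0, hfirst, hget,
      hS0, PySem.Str.len_eq]
  by_cases e1 : t = (['y', 't'] : List Char)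
  · have hfirst : PySem.Str.slice low none (some ((t.length : Int))) = "yt" := by
      apply String.toList_inj.mp
      rw [hp1t, e1]
      rfl
    simp only [e1, List.length_cons, List.length_nil] at hfirst
    norm_num at hfirst
    have hget : pvProviderMap.get? "yt" = some "youtube" := by decide
    simp [pickProviderLoop, pvMapping, pickAlt, pyPartition, hfind, e1, hfirst, hget,
      hS0, hS1, PySem.Str.len_eq]
  by_cases e2 : t = (['r', 'e', 'd', 'd', 'i', 't'] : List Char)
  · have hfirst : PySem.Str.slice low none (some ((t.length : Int))) = "reddit" := by
      apply String.toList_inj.mp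
      rw [hp1t, e2]
      rfl
    simp only [e2, List.length_cons, List.length_nil] at hfirst
    norm_num at hfirst
    have hget : pvProviderMap.get? "reddit" = some "reddit" := by decide
    simp [pickProviderLoop, pvMapping, pickAlt, pyPartition, hfind, e2, hfirst, hget,
      hS0, hS1, hS2, PySem.Str.len_eq]
  by_cases e3 : t = (['w', 'i', 'k', 'i', 'p', 'e', 'd', 'i', 'a'] : List Char)
  · have hfirst : PySem.Str.slice low none (some ((t.length : Int))) = "wikipedia" := by
      apply String.toList_inj.mp
      rw [hp1t, e3]
      rfl
    simp only [e3, List.length_cons, List.length_nil] at hfirst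
    norm_num at hfirst
    have hget : pvProviderMap.get? "wikipedia" = some "wikipedia" := by decide
    simp [pickProviderLoop, pvMapping, pickAlt, pyPartition, hfind, e3, hfirst, hget,
      hS0, hS1, hS2, hS3, PySem.Str.len_eq]
  by_cases e4 : t = (['w', 'i', 'k', 'i'] : List Char)
  · have hfirst : PySem.Str.slice low none (some ((t.length : Int))) = "wiki" := by
      apply String.toList_inj.mp
      rw [hp1t, e4]
      rfl
    simp only [e4, List.length_cons, List.length_nil] at hfirst
    norm_num at hfirst
    have hget : pvProviderMap.get? "wiki" = some "wikipedia" := by decide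
    simp [pickProviderLoop, pvMapping, pickAlt, pyPartition, hfind, e4, hfirst, hget,
      hS0, hS1, hS2, hS3, hS4, PySem.Str.len_eq]
  by_cases e5 : t = (['d', 'u', 'c', 'k', 'd', 'u', 'c', 'k', 'g', 'o'] : List Char)
  · have hfirst : PySem.Str.slice low none (some ((t.length : Int))) = "duckduckgo" := by
      apply String.toList_inj.mp
      rw [hp1t, e5]
      rfl
    simp only [e5, List.length_cons, List.length_nil] at hfirst
    norm_num at hfirst
    have hget : pvProviderMap.get? "duckduckgo" = some "duckduckgo" := by decide
    simp [pickProviderLoop, pvMapping, pickAlt, pyPartition, hfind, e5, hfirst, hget,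
      hS0, hS1, hS2, hS3, hS4, hS5, PySem.Str.len_eq]
  by_cases e6 : t = (['d', 'd', 'g'] : List Char)
  · have hfirst : PySem.Str.slice low none (some ((t.length : Int))) = "ddg" := by
      apply String.toList_inj.mp
      rw [hp1t, e6]
      rfl
    simp only [e6, List.length_cons, List.length_nil] at hfirst
    norm_num at hfirst
    have hget : pvProviderMap.get? "ddg" = some "duckduckgo" := by decide
    simp [pickProviderLoop, pvMapping, pickAlt, pyPartition, hfind, e6, hfirst, hget,
      hS0, hS1, hS2, hS3, hS4, hS5, hS6, PySem.Str.len_eq]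
  by_cases e7 : t = (['b', 'i', 'n', 'g'] : List Char)
  · have hfirst : PySem.Str.slice low none (some ((t.length : Int))) = "bing" := by
      apply String.toList_inj.mp
      rw [hp1t, e7]
      rfl
    simp only [e7, List.length_cons, List.length_nil] at hfirst
    norm_num at hfirst
    have hget : pvProviderMap.get? "bing" = some "bing" := by decide
    simp [pickProviderLoop, pvMapping, pickAlt, pyPartition, hfind, e7, hfirst, hget,
      hS0, hS1, hS2, hS3, hS4, hS5, hS6, hS7, PySem.Str.len_eq]
  by_cases e8 : t = (['b', 'r', 'a', 'v', 'e'] : List Char)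
  · have hfirst : PySem.Str.slice low none (some ((t.length : Int))) = "brave" := by
      apply String.toList_inj.mp
      rw [hp1t, e8]
      rfl
    simp only [e8, List.length_cons, List.length_nil] at hfirst
    norm_num at hfirst
    have hget : pvProviderMap.get? "brave" = some "brave" := by decide
    simp [pickProviderLoop, pvMapping, pickAlt, pyPartition, hfind, e8, hfirst, hget,
      hS0, hS1, hS2, hS3, hS4, hS5, hS6, hS7, hS8, PySem.Str.len_eq]
  by_cases e9 : t = (['g', 'o', 'o', 'g', 'l', 'e'] : List Char)
  · have hfirst : PySem.Str.slice low none (some ((t.length : Int))) = "google" := by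
      apply String.toList_inj.mp
      rw [hp1t, e9]
      rfl
    simp only [e9, List.length_cons, List.length_nil] at hfirst
    norm_num at hfirst
    have hget : pvProviderMap.get? "google" = some "google" := by decide
    simp [pickProviderLoop, pvMapping, pickAlt, pyPartition, hfind, e9, hfirst, hget,
      hS0, hS1, hS2, hS3, hS4, hS5, hS6, hS7, hS8, hS9, PySem.Str.len_eq]
  -- t is none of the keywords
  have f0 : ¬((['y', 'o', 'u', 't', 'u', 'b', 'e'] : List Char) = t) := fun h => e0 h.symm
  have f1 : ¬((['y', 't'] : List Char) = t) := fun h => e1 h.symm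
  have f2 : ¬((['r', 'e', 'd', 'd', 'i', 't'] : List Char) = t) := fun h => e2 h.symm
  have f3 : ¬((['w', 'i', 'k', 'i', 'p', 'e', 'd', 'i', 'a'] : List Char) = t) := fun h => e3 h.symm
  have f4 : ¬((['w', 'i', 'k', 'i'] : List Char) = t) := fun h => e4 h.symm
  have f5 : ¬((['d', 'u', 'c', 'k', 'd', 'u', 'c', 'k', 'g', 'o'] : List Char) = t) := fun h => e5 h.symm
  have f6 : ¬((['d', 'd', 'g'] : List Char) = t) := fun h => e6 h.symm
  have f7 : ¬((['b', 'i', 'n', 'g'] : List Char) = t) := fun h => e7 h.symm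
  have f8 : ¬((['b', 'r', 'a', 'v', 'e'] : List Char) = t) := fun h => e8 h.symm
  have f9 : ¬((['g', 'o', 'o', 'g', 'l', 'e'] : List Char) = t) := fun h => e9 h.symm
  have hget : pvProviderMap.get? (PySem.Str.slice low none (some ((t.length : Int)))) = none := by
    have hne : ∀ k : String, k.toList ≠ t → PySem.Str.slice low none (some ((t.length : Int))) ≠ k := by
      intro k hk hc
      exact hk (by rw [← hc, hp1t])
    have hb0 : (("youtube" : String) == PySem.Str.slice low none (some ((t.length : Int)))) = false := by
      rw [beq_eq_false_iff_ne]
      exact Ne.symm (hne "youtube" (fun h => e0 h.symm))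
    have hb1 : (("yt" : String) == PySem.Str.slice low none (some ((t.length : Int)))) = false := by
      rw [beq_eq_false_iff_ne]
      exact Ne.symm (hne "yt" (fun h => e1 h.symm))
    have hb2 : (("reddit" : String) == PySem.Str.slice low none (some ((t.length : Int)))) = false := by
      rw [beq_eq_false_iff_ne]
      exact Ne.symm (hne "reddit" (fun h => e2 h.symm))
    have hb3 : (("wikipedia" : String) == PySem.Str.slice low none (some ((t.length : Int)))) = false := by
      rw [beq_eq_false_iff_ne]
      exact Ne.symm (hne "wikipedia" (fun h => e3 h.symm))
    have hb4 : (("wiki" : String) == PySem.Str.slice low none (some ((t.length : Int)))) = false := by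
      rw [beq_eq_false_iff_ne]
      exact Ne.symm (hne "wiki" (fun h => e4 h.symm))
    have hb5 : (("duckduckgo" : String) == PySem.Str.slice low none (some ((t.length : Int)))) = false := by
      rw [beq_eq_false_iff_ne]
      exact Ne.symm (hne "duckduckgo" (fun h => e5 h.symm))
    have hb6 : (("ddg" : String) == PySem.Str.slice low none (some ((t.length : Int)))) = false := by
      rw [beq_eq_false_iff_ne]
      exact Ne.symm (hne "ddg" (fun h => e6 h.symm))
    have hb7 : (("bing" : String) == PySem.Str.slice low none (some ((t.length : Int)))) = false := by
      rw [beq_eq_false_iff_ne]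
      exact Ne.symm (hne "bing" (fun h => e7 h.symm))
    have hb8 : (("brave" : String) == PySem.Str.slice low none (some ((t.length : Int)))) = false := by
      rw [beq_eq_false_iff_ne]
      exact Ne.symm (hne "brave" (fun h => e8 h.symm))
    have hb9 : (("google" : String) == PySem.Str.slice low none (some ((t.length : Int)))) = false := by
      rw [beq_eq_false_iff_ne]
      exact Ne.symm (hne "google" (fun h => e9 h.symm))
    have hmk : pvProviderMap = PySem.Dict.mk [("youtube", "youtube"), ("yt", "youtube"), ("reddit", "reddit"), ("wikipedia", "wikipedia"), ("wiki", "wikipedia"), ("duckduckgo", "duckduckgo"), ("ddg", "duckduckgo"), ("bing", "bing"), ("brave", "brave"), ("google", "google")] := rfl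
    rw [hmk]
    simp only [PySem.Dict.get?_mk_cons, hb0, hb1, hb2, hb3, hb4, hb5, hb6, hb7, hb8, hb9,
      Bool.false_eq_true, if_false]
    simp [PySem.Dict.get?]
  simp [pickProviderLoop, pvMapping, pickAlt, pyPartition, hfind, hget,
    hS0, hS1, hS2, hS3, hS4, hS5, hS6, hS7, hS8, hS9, f0, f1, f2, f3, f4, f5, f6, f7, f8, f9]

theorem core (query default low : String) :
    pickProviderLoop query low default pvMapping = pickAlt query low default := by
  by_cases hsp : ' ' ∈ low.toList
  · exact core_space query default low hsp
  · exact core_nospace query default low hsp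

-- ===== VERDICT (by name: the statement is the Claim_ definition above) =====
theorem pick_provider_py_spec : Claim_equal_pick_provider_py := by
  intro query default _
  unfold Spec_pick_provider_py pick_provider_py pick_provider_py_alt
  exact core query default _
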